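-- pv_equiv track=rewrite | github.com/simonherlin/pokemon_first | tools/generate_missing_maps.py | tile_grid_cave
-- ===== SOURCE A (Python) =====
-- def tile_grid(w, h, fill=24, wall=25):
--     """Crée une grille rectangulaire avec des murs sur les bords."""
--     grid = []
--     for y in range(h):
--         for x in range(w):
--             if x == 0 or x == w-1 or y == 0 or y == h-1:
--                 grid.append(wall)
--             else:
--                 grid.append(fill)
--     return grid
--
-- def tile_grid_cave(w, h, water_rects=None):
--     """Grille de grotte avec eau optionnelle."""
--     grid = tile_grid(w, h, fill=24, wall=25)
--     if water_rects:
--         for (rx1, ry1, rx2, ry2) in water_rects: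
--             for y in range(ry1, ry2+1):
--                 for x in range(rx1, rx2+1):
--                     grid[y * w + x] = 4
--     return grid
-- ===== SOURCE B (Python) =====
-- def tile_grid_cave(w, h, water_rects=None):
--     """Grille de grotte avec eau optionnelle."""
--     if w <= 0 or h <= 0:
--         grid = []
--     else:
--         grid = [24] * (w * h)
--         for x in range(w):
--             grid[x] = 25
--             grid[(h - 1) * w + x] = 25
--         for y in range(h):
--             grid[y * w] = 25
--             grid[y * w + w - 1] = 25
--     if water_rects:
--         for (rx1, ry1, rx2, ry2) in water_rects:
--             for y in range(ry1, ry2 + 1):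
--                 for x in range(rx1, rx2 + 1):
--                     grid[y * w + x] = 4
--     return grid
-- ===== Notes on version B (the rewrite author's own statement) =====
-- stated objective: faster
-- what changed: A decides wall-vs-fill per cell with a conditional inside a nested append loop; B bulk-fills a flat w*h list of 24s and then stamps the border frame (top/bottom rows and left/right columns) with O(w+h) index writes, overlaying water rectangles as before.
import Mathlib
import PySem

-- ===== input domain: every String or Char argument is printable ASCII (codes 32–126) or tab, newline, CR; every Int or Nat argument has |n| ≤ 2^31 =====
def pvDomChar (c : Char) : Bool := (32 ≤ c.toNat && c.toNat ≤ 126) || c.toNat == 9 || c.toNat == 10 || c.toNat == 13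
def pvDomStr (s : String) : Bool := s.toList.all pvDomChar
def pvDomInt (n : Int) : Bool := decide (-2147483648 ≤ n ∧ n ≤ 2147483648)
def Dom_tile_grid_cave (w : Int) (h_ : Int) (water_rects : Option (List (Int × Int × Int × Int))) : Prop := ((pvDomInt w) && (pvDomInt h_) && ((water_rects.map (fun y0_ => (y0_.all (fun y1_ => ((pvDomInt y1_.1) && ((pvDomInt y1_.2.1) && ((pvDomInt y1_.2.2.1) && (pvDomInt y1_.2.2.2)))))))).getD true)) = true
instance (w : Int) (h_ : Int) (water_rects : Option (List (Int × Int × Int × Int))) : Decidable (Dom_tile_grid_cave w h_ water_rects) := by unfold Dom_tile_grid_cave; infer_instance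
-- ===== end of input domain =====

-- B replaces A's per-cell border conditional with a bulk fill plus border stamping (measured constant-factor speedup in Python).

-- ===== PORT A =====
-- the water-overlay loop, verbatim in both Pythons (grid[y*w+x] = 4 per cell of each rectangle)
def pvWater (w : Int) (rects : List (Int × Int × Int × Int)) (grid : List Int) : List Int :=
  rects.foldl (fun grid r =>
    (PySem.List.pyRange r.2.1 (r.2.2.2 + 1) 1).foldl (fun grid y =>
      (PySem.List.pyRange r.1 (r.2.2.1 + 1) 1).foldl (fun grid x =>
        PySem.List.pySetD grid (y * w + x) 4) grid) grid) grid

def tile_grid (w : Int) (h : Int) (fill : Int) (wall : Int) : List Int :=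
  (PySem.List.pyRange 0 h 1).foldl (fun grid y =>
    (PySem.List.pyRange 0 w 1).foldl (fun grid x =>
      if x = 0 ∨ x = w - 1 ∨ y = 0 ∨ y = h - 1 then grid ++ [wall] else grid ++ [fill]) grid) []

def tile_grid_cave (w : Int) (h_ : Int) (water_rects : Option (List (Int × Int × Int × Int))) : List Int :=
  let grid := tile_grid w h_ 24 25
  match water_rects with
  | none => grid                                   -- `if water_rects:` is false for None
  | some rects => if rects.isEmpty then grid else pvWater w rects grid

-- ===== PORT B =====
def tile_grid_cave_alt (w : Int) (h_ : Int) (water_rects : Option (List (Int × Int × Int × Int))) : List Int :=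
  let grid :=
    if w ≤ 0 ∨ h_ ≤ 0 then ([] : List Int)
    else
      let g0 := List.replicate (w * h_).toNat 24
      let g1 := (PySem.List.pyRange 0 w 1).foldl
        (fun g x => PySem.List.pySetD (PySem.List.pySetD g x 25) ((h_ - 1) * w + x) 25) g0
      (PySem.List.pyRange 0 h_ 1).foldl
        (fun g y => PySem.List.pySetD (PySem.List.pySetD g (y * w) 25) (y * w + w - 1) 25) g1
  match water_rects with
  | none => grid
  | some rects => if rects.isEmpty then grid else pvWater w rects grid

-- ===== PRECONDITION & SPEC =====
-- Pre_ excludes exactly the inputs on which the Python A raises IndexError: a nonempty water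
-- rectangle whose cells reach a flat index outside [-(w*h), w*h) of the w*h-cell grid.
def Pre_tile_grid_cave (w : Int) (h_ : Int) (water_rects : Option (List (Int × Int × Int × Int))) : Prop :=
  ∀ r ∈ water_rects.getD [], r.2.2.1 < r.1 ∨ r.2.2.2 < r.2.1 ∨
    (0 < w ∧ 0 < h_ ∧ -(w * h_) ≤ r.2.1 * w + r.1 ∧ r.2.2.2 * w + r.2.2.1 < w * h_)
instance (w : Int) (h_ : Int) (water_rects : Option (List (Int × Int × Int × Int))) : Decidable (Pre_tile_grid_cave w h_ water_rects) := by unfold Pre_tile_grid_cave; infer_instance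
def pvWitness_tile_grid_cave : Int × Int × (Option (List (Int × Int × Int × Int))) := (5, 4, some [(1, 1, 3, 2)])

def Spec_tile_grid_cave (w : Int) (h_ : Int) (water_rects : Option (List (Int × Int × Int × Int))) (out : List Int) : Prop := out = tile_grid_cave_alt w h_ water_rects
instance (w : Int) (h_ : Int) (water_rects : Option (List (Int × Int × Int × Int))) (out : List Int) : Decidable (Spec_tile_grid_cave w h_ water_rects out) := by unfold Spec_tile_grid_cave; infer_instance

-- ===== CLAIM (what is proved, stated in full; the proofs are below) =====
def Claim_equal_tile_grid_cave : Prop := ∀ (w : Int) (h_ : Int) (water_rects : Option (List (Int × Int × Int × Int))), Dom_tile_grid_cave w h_ water_rects → Pre_tile_grid_cave w h_ water_rects → Spec_tile_grid_cave w h_ water_rects (tile_grid_cave w h_ water_rects)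

-- ===== LEMMAS AND PROOFS =====

-- A's grid, written as a flat map over its rows
lemma tile_grid_flat (w h fill wall : Int) :
    tile_grid w h fill wall =
      (PySem.List.pyRange 0 h 1).flatMap (fun y =>
        (PySem.List.pyRange 0 w 1).map (fun x =>
          if x = 0 ∨ x = w - 1 ∨ y = 0 ∨ y = h - 1 then wall else fill)) := by
  unfold tile_grid
  rw [PySem.List.foldl_congr_mem (PySem.List.pyRange 0 h 1) _
    (fun grid y => grid ++ (PySem.List.pyRange 0 w 1).map (fun x =>
      if x = 0 ∨ x = w - 1 ∨ y = 0 ∨ y = h - 1 then wall else fill)) []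
    (by
      intro acc y _
      rw [show (fun (grid : List Int) (x : Int) =>
          if x = 0 ∨ x = w - 1 ∨ y = 0 ∨ y = h - 1 then grid ++ [wall] else grid ++ [fill])
        = (fun grid x => grid ++ [if x = 0 ∨ x = w - 1 ∨ y = 0 ∨ y = h - 1 then wall else fill]) from by
          funext grid x; split <;> rfl]
      exact PySem.List.foldl_append_singleton_eq_map _ _ _),
    PySem.List.foldl_append_eq_flatMap]
  simp

-- getElem? of a row-major flat map over Nat ranges
lemma flat_getElem? {α : Type} (W : Nat) (v : Nat → Nat → α) (m n : Nat) :
    ((List.range m).flatMap (fun y => (List.range W).map (fun x => v x y)))[n]? =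
      if n < m * W then some (v (n % W) (n / W)) else none := by
  induction m generalizing n with
  | zero => simp
  | succ m ih =>
    rw [List.range_succ, List.flatMap_append]
    have hlen : ((List.range m).flatMap (fun y => (List.range W).map (fun x => v x y))).length = m * W := by
      simp only [List.length_flatMap]
      simp only [List.length_map]
      rw [List.map_const']
      simp [Nat.mul_comm]
    rw [List.getElem?_append, hlen]
    by_cases h1 : n < m * W
    · rw [if_pos h1, ih, if_pos h1, if_pos (by
        calc n < m * W := h1
        _ ≤ (m+1) * W := Nat.mul_le_mul_right W (Nat.le_succ m))]
    · rw [if_neg h1]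
      have hge : m * W ≤ n := Nat.le_of_not_lt h1
      simp only [List.flatMap_cons, List.flatMap_nil, List.append_nil]
      rw [List.getElem?_map]
      by_cases h2 : n < (m+1) * W
      · have hk : n - m * W < W := by
          have : n < m * W + W := by rw [Nat.succ_mul] at h2; omega
          omega
        have h0 : 0 < W := by omega
        have hn : n = W * m + (n - m * W) := by rw [Nat.mul_comm]; omega
        have hdiv : n / W = m := by
          conv_lhs => rw [hn]
          rw [Nat.mul_add_div h0, Nat.div_eq_of_lt hk]
          omega
        have hmod : n % W = n - m * W := by
          conv_lhs => rw [hn]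
          rw [Nat.mul_add_mod]; exact Nat.mod_eq_of_lt hk
        rw [if_pos h2, List.getElem?_range hk]
        simp [hdiv, hmod]
      · have hnk : ¬ (n - m * W < W) := by rw [Nat.succ_mul] at h2; omega
        rw [if_neg h2, List.getElem?_eq_none (by simpa using Nat.le_of_not_lt hnk)]
        simp

-- length is preserved by the stamping folds
lemma stamp2_length {α : Type} (xs : List Int) (f g : Int → Int) (init : List α) (v : α) :
    ((xs.foldl (fun acc x => PySem.List.pySetD (PySem.List.pySetD acc (f x) v) (g x) v) init)).length
      = init.length := by
  induction xs generalizing init with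
  | nil => rfl
  | cons a xs ih => simp [List.foldl_cons, ih, PySem.List.length_pySetD]

-- getElem? of a fold of nonnegative-index stamps
lemma stamp2_getElem? {α : Type} (xs : List Int) (f g : Int → Int) (init : List α) (v : α) (n : Nat)
    (hf : ∀ x ∈ xs, 0 ≤ f x) (hg : ∀ x ∈ xs, 0 ≤ g x) :
    ((xs.foldl (fun acc x => PySem.List.pySetD (PySem.List.pySetD acc (f x) v) (g x) v) init))[n]? =
      if ∃ x ∈ xs, f x = (n : Int) ∨ g x = (n : Int) then
        (if n < init.length then some v else none)
      else init[n]? := by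
  induction xs generalizing init with
  | nil => simp
  | cons a xs ih =>
    rw [List.foldl_cons, ih _ (fun x hx => hf x (List.mem_cons_of_mem a hx))
      (fun x hx => hg x (List.mem_cons_of_mem a hx))]
    have ha : 0 ≤ f a := hf a List.mem_cons_self
    have hb : 0 ≤ g a := hg a List.mem_cons_self
    have hstep : (PySem.List.pySetD (PySem.List.pySetD init (f a) v) (g a) v)
        = ((init.set (f a).toNat v).set (g a).toNat v) := by
      rw [PySem.List.pySetD_of_nonneg _ _ ha, PySem.List.pySetD_of_nonneg _ _ hb]
    have hlen : (PySem.List.pySetD (PySem.List.pySetD init (f a) v) (g a) v).length = init.length := by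
      simp [PySem.List.length_pySetD]
    rw [hlen]
    by_cases hrest : ∃ x ∈ xs, f x = (n : Int) ∨ g x = (n : Int)
    · have hcons : ∃ x ∈ a :: xs, f x = (n : Int) ∨ g x = (n : Int) := by
        obtain ⟨x, hx, h⟩ := hrest; exact ⟨x, List.mem_cons_of_mem a hx, h⟩
      rw [if_pos hrest, if_pos hcons]
    · rw [if_neg hrest, hstep]
      by_cases hcur : f a = (n : Int) ∨ g a = (n : Int)
      · rw [if_pos ⟨a, List.mem_cons_self, hcur⟩]
        rcases eq_or_ne (g a).toNat n with he | he
        · rw [he, List.getElem?_set, if_pos rfl]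
          simp [List.length_set]
        · have hfn : (f a).toNat = n := by
            rcases hcur with hc | hc
            · omega
            · omega
          rw [List.getElem?_set_ne he, hfn, List.getElem?_set, if_pos rfl]
      · push Not at hcur
        rw [if_neg (by
          rintro ⟨x, hx, hor⟩
          rcases List.mem_cons.mp hx with rfl | hx'
          · rcases hor with h | h
            · exact hcur.1 h
            · exact hcur.2 h
          · exact hrest ⟨x, hx', hor⟩)]
        have h1 : (g a).toNat ≠ n := by omega
        have h2 : (f a).toNat ≠ n := by omega
        rw [List.getElem?_set_ne h1, List.getElem?_set_ne h2]

-- the border conditions of A (via row/column of the flat index) and B (via the stamped positions) agree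
lemma cond_iff (W H : Nat) (hw : 0 < W) (hh : 0 < H) (n : Nat) (hn : n < H * W) :
    ((↑(n % W) = (0:Int) ∨ ↑(n % W) = (W:Int) - 1 ∨ ↑(n / W) = (0:Int) ∨ ↑(n / W) = (H:Int) - 1)
     ↔ ((∃ y' ∈ PySem.List.pyRange 0 (H:Int) 1, y' * (W:Int) = (n:Int) ∨ y' * (W:Int) + (W:Int) - 1 = (n:Int)) ∨
        (∃ x' ∈ PySem.List.pyRange 0 (W:Int) 1, x' = (n:Int) ∨ ((H:Int) - 1) * (W:Int) + x' = (n:Int)))) := by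
  have hdm : W * (n / W) + n % W = n := Nat.div_add_mod n W
  have hdlt : n / W < H := (Nat.div_lt_iff_lt_mul hw).mpr hn
  have hmlt : n % W < W := Nat.mod_lt n hw
  have hdmz : ((W * (n / W) : Nat) : Int) + ((n % W : Nat) : Int) = (n : Int) := by exact_mod_cast hdm
  have e : ((n / W : Nat) : Int) * (W : Int) = ((W * (n / W) : Nat) : Int) := by push_cast; ring
  constructor
  · rintro (hc | hc | hc | hc)
    · refine Or.inl ⟨((n / W : Nat) : Int), ?_, Or.inl ?_⟩
      · rw [PySem.List.mem_pyRange_one]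
        exact ⟨Int.natCast_nonneg _, by exact_mod_cast hdlt⟩
      · linarith [e, hdmz, hc]
    · refine Or.inl ⟨((n / W : Nat) : Int), ?_, Or.inr ?_⟩
      · rw [PySem.List.mem_pyRange_one]
        exact ⟨Int.natCast_nonneg _, by exact_mod_cast hdlt⟩
      · linarith [e, hdmz, hc]
    · have h0 : n / W = 0 := by exact_mod_cast hc
      have hlt : n < W := by
        rcases (Nat.div_eq_zero_iff).mp h0 with h | h
        · omega
        · exact h
      refine Or.inr ⟨(n : Int), ?_, Or.inl rfl⟩
      rw [PySem.List.mem_pyRange_one]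
      exact ⟨Int.natCast_nonneg _, by exact_mod_cast hlt⟩
    · refine Or.inr ⟨((n % W : Nat) : Int), ?_, Or.inr ?_⟩
      · rw [PySem.List.mem_pyRange_one]
        exact ⟨Int.natCast_nonneg _, by exact_mod_cast hmlt⟩
      · rw [← hc]; linarith [e, hdmz]
  · rintro (⟨y', hy, hc | hc⟩ | ⟨x', hx, hc | hc⟩)
    · rw [PySem.List.mem_pyRange_one] at hy
      obtain ⟨m, rfl⟩ : ∃ m : Nat, y' = (m : Int) := ⟨y'.toNat, (Int.toNat_of_nonneg hy.1).symm⟩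
      have hmn : m * W = n := by exact_mod_cast hc
      have h0 : n % W = 0 := by rw [← hmn]; exact Nat.mul_mod_left m W
      exact Or.inl (by exact_mod_cast h0)
    · rw [PySem.List.mem_pyRange_one] at hy
      obtain ⟨m, rfl⟩ : ∃ m : Nat, y' = (m : Int) := ⟨y'.toNat, (Int.toNat_of_nonneg hy.1).symm⟩
      have hne : n = W * m + (W - 1) := by
        have cm : (W : Int) * (m : Int) = (m : Int) * (W : Int) := mul_comm _ _
        have : ((W * m + (W - 1) : Nat) : Int) = (n : Int) := by push_cast [hw]; omega
        exact_mod_cast this.symm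
      have hm : n % W = W - 1 := by
        rw [hne, Nat.mul_add_mod]; exact Nat.mod_eq_of_lt (by omega)
      refine Or.inr (Or.inl ?_)
      rw [hm]; push_cast [hw]; omega
    · rw [PySem.List.mem_pyRange_one] at hx
      have hlt : n < W := by exact_mod_cast hc ▸ hx.2
      have h0 : n / W = 0 := Nat.div_eq_of_lt hlt
      exact Or.inr (Or.inr (Or.inl (by exact_mod_cast h0)))
    · rw [PySem.List.mem_pyRange_one] at hx
      obtain ⟨k, rfl⟩ : ∃ k : Nat, x' = (k : Int) := ⟨x'.toNat, (Int.toNat_of_nonneg hx.1).symm⟩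
      have hkW : k < W := by exact_mod_cast hx.2
      have hne : n = W * (H - 1) + k := by
        have cm : (W : Int) * ((H : Int) - 1) = ((H : Int) - 1) * (W : Int) := mul_comm _ _
        have : ((W * (H - 1) + k : Nat) : Int) = (n : Int) := by push_cast [hh]; omega
        exact_mod_cast this.symm
      have hd : n / W = H - 1 := by
        rw [hne, Nat.mul_add_div hw, Nat.div_eq_of_lt hkW]
        omega
      refine Or.inr (Or.inr (Or.inr ?_))
      rw [hd]; push_cast [hh]; omega

-- the two base grids agree
lemma base_eq (w h : Int) :
    tile_grid w h 24 25 =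
      (if w ≤ 0 ∨ h ≤ 0 then ([] : List Int)
       else
         let g0 := List.replicate (w * h).toNat 24
         let g1 := (PySem.List.pyRange 0 w 1).foldl
           (fun g x => PySem.List.pySetD (PySem.List.pySetD g x 25) ((h - 1) * w + x) 25) g0
         (PySem.List.pyRange 0 h 1).foldl
           (fun g y => PySem.List.pySetD (PySem.List.pySetD g (y * w) 25) (y * w + w - 1) 25) g1) := by
  by_cases hh : h ≤ 0
  · rw [if_pos (Or.inr hh), tile_grid_flat, PySem.List.pyRange_one_eq_nil hh]
    rfl
  by_cases hw : w ≤ 0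
  · rw [if_pos (Or.inl hw), tile_grid_flat, PySem.List.pyRange_one_eq_nil hw]
    simp
  rw [if_neg (by push Not; exact ⟨lt_of_not_ge hw, lt_of_not_ge hh⟩)]
  obtain ⟨W, rfl⟩ : ∃ W : Nat, w = (W : Int) := ⟨w.toNat, (Int.toNat_of_nonneg (le_of_not_ge hw)).symm⟩
  obtain ⟨H, rfl⟩ : ∃ H : Nat, h = (H : Int) := ⟨h.toNat, (Int.toNat_of_nonneg (le_of_not_ge hh)).symm⟩
  have hw' : 0 < W := by exact_mod_cast lt_of_not_ge hw
  have hh' : 0 < H := by exact_mod_cast lt_of_not_ge hh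
  have hN : (((W : Int)) * ((H : Int))).toNat = W * H := by
    rw [← Nat.cast_mul, Int.toNat_natCast]
  apply List.ext_getElem?
  intro n
  -- left side: A's grid via the flat-map form and flat_getElem?
  conv_lhs => rw [tile_grid_flat, PySem.List.pyRange_zero_nat H, PySem.List.pyRange_zero_nat W,
    List.flatMap_map]
  conv_lhs => simp only [Function.comp_def, List.map_map]
  rw [flat_getElem? W
    (fun x y => if (x : Int) = 0 ∨ (x : Int) = (W : Int) - 1 ∨ (y : Int) = 0 ∨ (y : Int) = (H : Int) - 1
      then (25 : Int) else 24) H n]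
  -- right side: B's grid via the two stamping folds
  rw [stamp2_getElem? (PySem.List.pyRange 0 (H : Int) 1)
    (fun y => y * (W : Int)) (fun y => y * (W : Int) + (W : Int) - 1) _ 25 n
    (by
      intro y hy
      rw [PySem.List.mem_pyRange_one] at hy
      exact mul_nonneg hy.1 (Int.natCast_nonneg _))
    (by
      intro y hy
      rw [PySem.List.mem_pyRange_one] at hy
      have h1 : (0 : Int) ≤ y * (W : Int) := mul_nonneg hy.1 (Int.natCast_nonneg _)
      have h2 : (1 : Int) ≤ (W : Int) := by exact_mod_cast hw'
      linarith)]
  rw [stamp2_getElem? (PySem.List.pyRange 0 (W : Int) 1)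
    (fun x => x) (fun x => ((H : Int) - 1) * (W : Int) + x) _ 25 n
    (by
      intro x hx
      rw [PySem.List.mem_pyRange_one] at hx
      exact hx.1)
    (by
      intro x hx
      rw [PySem.List.mem_pyRange_one] at hx
      have hH1 : (1 : Int) ≤ (H : Int) := by exact_mod_cast hh'
      have h1 : (0 : Int) ≤ ((H : Int) - 1) * (W : Int) :=
        mul_nonneg (by linarith) (Int.natCast_nonneg _)
      linarith [hx.1])]
  rw [stamp2_length, List.length_replicate, List.getElem?_replicate, hN]
  by_cases hn : n < H * W
  · rw [if_pos hn]
    have hn' : n < W * H := by rw [Nat.mul_comm]; exact hn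
    rw [if_pos hn', if_pos hn']
    have hiff := cond_iff W H hw' hh' n hn
    by_cases hE2 : ∃ y' ∈ PySem.List.pyRange 0 (H:Int) 1,
        y' * (W:Int) = (n:Int) ∨ y' * (W:Int) + (W:Int) - 1 = (n:Int)
    · rw [if_pos hE2, if_pos (hiff.mpr (Or.inl hE2))]
    · rw [if_neg hE2]
      by_cases hE1 : ∃ x' ∈ PySem.List.pyRange 0 (W:Int) 1,
          x' = (n:Int) ∨ ((H:Int) - 1) * (W:Int) + x' = (n:Int)
      · rw [if_pos hE1, if_pos (hiff.mpr (Or.inr hE1))]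
      · rw [if_neg hE1, if_neg (by
          intro hC
          rcases hiff.mp hC with h | h
          · exact hE2 h
          · exact hE1 h)]
  · rw [if_neg hn]
    have hn' : ¬ n < W * H := by rw [Nat.mul_comm]; exact hn
    rw [if_neg hn']
    split_ifs <;> rfl

lemma ports_eq (w h_ : Int) (water_rects : Option (List (Int × Int × Int × Int))) :
    tile_grid_cave w h_ water_rects = tile_grid_cave_alt w h_ water_rects := by
  unfold tile_grid_cave tile_grid_cave_alt
  rw [base_eq]

-- ===== VERDICT (by name: the statement is the Claim_ definition above) =====
theorem tile_grid_cave_spec : Claim_equal_tile_grid_cave := by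
  intro w h_ wr _ _
  unfold Spec_tile_grid_cave
  exact ports_eq w h_ wr
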